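-- pv_equiv track=rewrite | github.com/sophiaLichtenberg/AnalyzingAndVisualizingInPython | project/skyscanner.py | getMinPrice
-- ===== SOURCE A (Python) =====
-- def getMinPrice(requiredSeats, seatPrices):
--     result = -1
--     found = False
--     for row in seatPrices:
--         counted_list = []
--         sum = 0
--         for e in row:
--             if e == -1:
--                 counted_list = []
--                 sum = 0
--             else:
--                 # Check if there were requiredSeats before
--                 if len(counted_list) == requiredSeats:
--                     sum -= counted_list.pop(0)
--                 counted_list.append(e)
--                 sum += e
--                 if len(counted_list) == requiredSeats:
--                     if result > sum or result == -1:
--                         result = sum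
--                         found = True
--     return result if found else -1
-- ===== SOURCE B (Python) =====
-- def _segments(row):
--     # maximal runs of non-(-1) seats
--     segs = []
--     cur = []
--     for e in row:
--         if e == -1:
--             if cur:
--                 segs.append(cur)
--             cur = []
--         else:
--             cur.append(e)
--     if cur:
--         segs.append(cur)
--     return segs
--
--
-- def getMinPrice(requiredSeats, seatPrices):
--     k = requiredSeats
--     if k < 1:
--         return -1
--     result = -1
--     found = False
--     for row in seatPrices:
--         for seg in _segments(row):
--             # prefix sums: pref[i] = sum of seg[:i]
--             pref = [0]
--             for e in seg:
--                 pref.append(pref[-1] + e)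
--             for i in range(len(seg) - k + 1):
--                 s = pref[i + k] - pref[i]
--                 if result > s or result == -1:
--                     result = s
--                     found = True
--     return result if found else -1
-- ===== Notes on version B (the rewrite author's own statement) =====
-- stated objective: alternative
-- what changed: B replaces A's online window queue (a list with an O(k) pop(0) per element) by a staged decomposition: each row is first split into maximal runs of non-(-1) seats, each run gets a prefix-sum array built once, and every k-window sum is then read off as one prefix difference; no window is ever materialised or maintained. Intended as faster (O(n) vs O(n*k)); measured only 1.45x at the largest timing size, so not claimed.
import Mathlib
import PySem

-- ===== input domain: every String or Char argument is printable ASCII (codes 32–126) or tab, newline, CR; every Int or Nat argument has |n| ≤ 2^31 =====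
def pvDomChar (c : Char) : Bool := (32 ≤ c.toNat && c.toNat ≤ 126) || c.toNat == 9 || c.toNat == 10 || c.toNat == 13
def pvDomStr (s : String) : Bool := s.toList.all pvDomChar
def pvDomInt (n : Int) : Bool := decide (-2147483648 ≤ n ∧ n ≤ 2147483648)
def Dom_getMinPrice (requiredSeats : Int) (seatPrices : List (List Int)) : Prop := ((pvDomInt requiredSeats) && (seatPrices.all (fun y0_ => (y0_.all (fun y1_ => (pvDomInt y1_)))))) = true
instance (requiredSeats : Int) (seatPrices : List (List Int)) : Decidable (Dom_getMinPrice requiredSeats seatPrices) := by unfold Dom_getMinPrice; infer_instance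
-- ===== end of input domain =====

-- B (alternative algorithm): instead of A's online window queue with pop(0), B splits each
-- row into maximal runs of non-(-1) seats, builds a prefix-sum array per run once, and reads
-- every k-window sum off as a prefix difference.

-- ===== PORT A =====
-- one inner-loop step of A: state (counted_list, sum, result, found)
def stepA (k : Int) (st : List Int × Int × Int × Bool) (e : Int) : List Int × Int × Int × Bool :=
  match st with
  | (cl, s, r, f) =>
    if e = -1 then ([], 0, r, f)
    else
      -- counted_list.pop(0): under Pre_ the list is nonempty here, so tail/headD is exact
      let p := if (cl.length : Int) = k then (cl.tail, s - cl.headD 0) else (cl, s)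
      let cl2 := p.1 ++ [e]
      let s2 := p.2 + e
      if (cl2.length : Int) = k then
        if r > s2 ∨ r = -1 then (cl2, s2, s2, true) else (cl2, s2, r, f)
      else (cl2, s2, r, f)

-- one outer-loop step of A: state (result, found)
def rowA (k : Int) (acc : Int × Bool) (row : List Int) : Int × Bool :=
  let st := row.foldl (stepA k) ([], 0, acc.1, acc.2)
  (st.2.2.1, st.2.2.2)

def getMinPrice (requiredSeats : Int) (seatPrices : List (List Int)) : Int :=
  let fin := seatPrices.foldl (rowA requiredSeats) (-1, false)
  if fin.2 then fin.1 else -1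

-- ===== PORT B =====
-- _segments: one step of the splitting loop, state (segs, cur)
def pvSegStep (p : List (List Int) × List Int) (e : Int) : List (List Int) × List Int :=
  if e = -1 then (if p.2 = [] then p.1 else p.1 ++ [p.2], [])
  else (p.1, p.2 ++ [e])

def pvSegments (row : List Int) : List (List Int) :=
  let p := row.foldl pvSegStep ([], [])
  if p.2 = [] then p.1 else p.1 ++ [p.2]

-- pref.append(pref[-1] + e); pref is always nonempty, so pref[-1] is getLastD 0 (exact here)
def pvPrefix (seg : List Int) : List Int :=
  seg.foldl (fun pref e => pref ++ [pref.getLastD 0 + e]) [0]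

-- the update rule on (result, found)
def pvUpd (st : Int × Bool) (s : Int) : Int × Bool :=
  if st.1 > s ∨ st.1 = -1 then (s, true) else st

-- the inner 'for i in range(len(seg) - k + 1)' loop of B
def pvSegFold (k : Int) (st : Int × Bool) (seg : List Int) : Int × Bool :=
  let pref := pvPrefix seg
  (PySem.List.pyRange 0 ((seg.length : Int) - k + 1) 1).foldl
    (fun st i => pvUpd st (PySem.List.pyGetD pref (i + k) 0 - PySem.List.pyGetD pref i 0)) st

def pvRowB (k : Int) (st : Int × Bool) (row : List Int) : Int × Bool :=
  (pvSegments row).foldl (pvSegFold k) st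

def getMinPrice_alt (requiredSeats : Int) (seatPrices : List (List Int)) : Int :=
  if requiredSeats < 1 then -1
  else
    let fin := seatPrices.foldl (pvRowB requiredSeats) (-1, false)
    if fin.2 then fin.1 else -1

-- ===== PRECONDITION & SPEC =====
-- Pre_ excludes exactly the inputs on which A raises IndexError: requiredSeats == 0
-- together with some seat price != -1 makes A pop(0) from an empty list.
def Pre_getMinPrice (requiredSeats : Int) (seatPrices : List (List Int)) : Prop :=
  requiredSeats = 0 → ∀ row ∈ seatPrices, ∀ e ∈ row, e = -1
instance (requiredSeats : Int) (seatPrices : List (List Int)) : Decidable (Pre_getMinPrice requiredSeats seatPrices) := by unfold Pre_getMinPrice; infer_instance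

def pvWitness_getMinPrice : Int × List (List Int) := (2, [[3, 4, -1, 5, 1, 2]])

def Spec_getMinPrice (requiredSeats : Int) (seatPrices : List (List Int)) (out : Int) : Prop := out = getMinPrice_alt requiredSeats seatPrices
instance (requiredSeats : Int) (seatPrices : List (List Int)) (out : Int) : Decidable (Spec_getMinPrice requiredSeats seatPrices out) := by unfold Spec_getMinPrice; infer_instance

-- ===== CLAIM (what is proved, stated in full; the proofs are below) =====
def Claim_equal_getMinPrice : Prop := ∀ (requiredSeats : Int) (seatPrices : List (List Int)), Dom_getMinPrice requiredSeats seatPrices → Pre_getMinPrice requiredSeats seatPrices → Spec_getMinPrice requiredSeats seatPrices (getMinPrice requiredSeats seatPrices)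

-- ===== LEMMAS AND PROOFS =====

-- processing one whole segment of A's inner loop, abstracted over the (result, found) pair
def procA (k : Int) (acc : Int × Bool) (seg : List Int) : Int × Bool :=
  (seg.foldl (stepA k) ([], 0, acc.1, acc.2)).2.2

-- the list of all k-window sums of a segment
def wsum (seg : List Int) (kn : Nat) (i : Nat) : Int := ((seg.drop i).take kn).sum
def wlist (seg : List Int) (kn : Nat) : List Int := (List.range (seg.length + 1 - kn)).map (wsum seg kn)

-- the segment fold's accumulator splits off its first component
lemma segStep_shift (row : List Int) : ∀ (done : List (List Int)) (cur : List Int),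
    row.foldl pvSegStep (done, cur)
      = (done ++ (row.foldl pvSegStep ([], cur)).1, (row.foldl pvSegStep ([], cur)).2) := by
  induction row with
  | nil => intro done cur; simp
  | cons e row ih =>
    intro done cur
    simp only [List.foldl_cons]
    by_cases he : e = -1
    · by_cases hc : cur = []
      · have h1 : pvSegStep (done, cur) e = (done, []) := by simp [pvSegStep, he, hc]
        have h2 : pvSegStep ([], cur) e = ([], []) := by simp [pvSegStep, he, hc]
        rw [h1, h2]
        exact ih done []
      · have h1 : pvSegStep (done, cur) e = (done ++ [cur], []) := by simp [pvSegStep, he, hc]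
        have h2 : pvSegStep ([], cur) e = ([cur], []) := by simp [pvSegStep, he, hc]
        rw [h1, h2, ih (done ++ [cur]) [], ih [cur] []]
        simp
    · have h1 : pvSegStep (done, cur) e = (done, cur ++ [e]) := by simp [pvSegStep, he]
      have h2 : pvSegStep ([], cur) e = ([], cur ++ [e]) := by simp [pvSegStep, he]
      rw [h1, h2]
      exact ih done (cur ++ [e])

-- no segment produced by the splitting fold contains -1
lemma segs_aux (row : List Int) : ∀ (done : List (List Int)) (cur : List Int),
    (∀ s ∈ done, ∀ e ∈ s, e ≠ -1) → (∀ e ∈ cur, e ≠ -1) →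
    ∀ seg ∈ (let p := row.foldl pvSegStep (done, cur);
             if p.2 = [] then p.1 else p.1 ++ [p.2]), ∀ e ∈ seg, e ≠ -1 := by
  induction row with
  | nil =>
    intro done cur hd hc seg hseg
    simp only [List.foldl_nil] at hseg
    by_cases h : cur = []
    · rw [if_pos h] at hseg
      exact hd seg hseg
    · rw [if_neg h] at hseg
      rcases List.mem_append.mp hseg with h1 | h1
      · exact hd seg h1
      · rw [List.mem_singleton.mp h1]; exact hc
  | cons e row ih =>
    intro done cur hd hc seg hseg
    simp only [List.foldl_cons] at hseg
    by_cases he : e = -1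
    · by_cases hcur : cur = []
      · rw [show pvSegStep (done, cur) e = (done, []) from by simp [pvSegStep, he, hcur]] at hseg
        exact ih done [] hd (by simp) seg hseg
      · rw [show pvSegStep (done, cur) e = (done ++ [cur], []) from by simp [pvSegStep, he, hcur]] at hseg
        refine ih (done ++ [cur]) [] ?_ (by simp) seg hseg
        intro s hs
        rcases List.mem_append.mp hs with h1 | h1
        · exact hd s h1
        · rw [List.mem_singleton.mp h1]; exact hc
    · rw [show pvSegStep (done, cur) e = (done, cur ++ [e]) from by simp [pvSegStep, he]] at hseg
      refine ih done (cur ++ [e]) hd ?_ seg hseg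
      intro x hx
      rcases List.mem_append.mp hx with h1 | h1
      · exact hc x h1
      · rw [List.mem_singleton.mp h1]; exact he

lemma segments_no_neg (row : List Int) :
    ∀ seg ∈ pvSegments row, ∀ e ∈ seg, e ≠ -1 :=
  segs_aux row [] [] (by simp) (by simp)

-- A's inner fold over a row = fold of procA over the segments
lemma segSplit (k : Int) : ∀ (row cur : List Int) (r : Int) (f : Bool),
    (row.foldl (stepA k) (cur.foldl (stepA k) ([], 0, r, f))).2.2
      = (let p := row.foldl pvSegStep ([], cur);
         if p.2 = [] then p.1 else p.1 ++ [p.2]).foldl (procA k) (r, f) := by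
  intro row
  induction row with
  | nil =>
    intro cur r f
    by_cases h : cur = []
    · subst h; simp
    · simp only [List.foldl_nil, if_neg h]
      rfl
  | cons e row ih =>
    intro cur r f
    simp only [List.foldl_cons]
    rcases hS : cur.foldl (stepA k) ([], 0, r, f) with ⟨cl, s, r', f'⟩
    by_cases he : e = -1
    · have hstep : stepA k (cl, s, r', f') e = ([], 0, r', f') := by simp [stepA, he]
      rw [hstep]
      have hL : (row.foldl (stepA k) ([], 0, r', f')).2.2
          = (let p := row.foldl pvSegStep ([], []);
             if p.2 = [] then p.1 else p.1 ++ [p.2]).foldl (procA k) (r', f') := by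
        have := ih [] r' f'
        simpa using this
      rw [hL]
      by_cases hcur : cur = []
      · rw [show pvSegStep ([], cur) e = ([], []) from by simp [pvSegStep, he, hcur]]
        have hrf : (r', f') = (r, f) := by
          subst hcur
          simp only [List.foldl_nil] at hS
          rw [show r' = r from by injection hS with _ h; injection h with _ h2; injection h2 with h3 _; exact h3.symm,
              show f' = f from by injection hS with _ h; injection h with _ h2; injection h2 with _ h4; exact h4.symm]
        rw [hrf]
      · rw [show pvSegStep ([], cur) e = ([cur], []) from by simp [pvSegStep, he, hcur]]
        rw [segStep_shift row [cur] []]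
        have hproc : procA k (r, f) cur = (r', f') := by
          unfold procA
          rw [hS]
        rcases hX : row.foldl pvSegStep ([], []) with ⟨segs, pend⟩
        simp only []
        by_cases hp : pend = []
        · subst hp
          simp only [reduceIte]
          rw [show ([cur] ++ segs).foldl (procA k) (r, f)
              = segs.foldl (procA k) (procA k (r, f) cur) from by simp,
            hproc]
        · simp only [if_neg hp]
          rw [show ([cur] ++ segs ++ [pend]).foldl (procA k) (r, f)
              = (segs ++ [pend]).foldl (procA k) (procA k (r, f) cur) from by
                rw [List.append_assoc]
                simp [List.foldl_append],
            hproc]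
    · have hstep : stepA k (cl, s, r', f') e = (cur ++ [e]).foldl (stepA k) ([], 0, r, f) := by
        rw [List.foldl_append, hS]
        simp
      rw [hstep]
      rw [show pvSegStep ([], cur) e = ([], cur ++ [e]) from by simp [pvSegStep, he]]
      exact ih (cur ++ [e]) r f

-- within a segment (no -1), A's fold performs exactly the pvUpd fold over the remaining window sums
lemma segA_eq (kn : Nat) (hk : 1 ≤ kn) (seg : List Int) (hne : ∀ e ∈ seg, e ≠ -1) :
    ∀ (t pre : List Int), seg = pre ++ t → ∀ (r : Int) (f : Bool),
    (t.foldl (stepA (kn : Int))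
        (pre.drop (pre.length - kn), (pre.drop (pre.length - kn)).sum, r, f)).2.2
      = List.foldl pvUpd (r, f) ((wlist seg kn).drop (pre.length + 1 - kn)) := by
  intro t
  induction t with
  | nil =>
    intro pre hsp r f
    have hp : seg = pre := by simpa using hsp
    have hnil : (wlist seg kn).drop (pre.length + 1 - kn) = [] := by
      apply List.drop_eq_nil_of_le
      simp [wlist, hp]
    rw [hnil]
    rfl
  | cons e t ih =>
    intro pre hsp r f
    have he : e ≠ -1 := hne e (by rw [hsp]; simp)
    have hpre_lt : pre.length < seg.length := by rw [hsp]; simp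
    have hwlen : (wlist seg kn).length = seg.length + 1 - kn := by simp [wlist]
    have hsp' : seg = (pre ++ [e]) ++ t := by rw [hsp]; simp
    simp only [List.foldl_cons]
    by_cases hble : kn ≤ pre.length
    · -- the window is full: A pops the head
      have hlen1 : (pre.drop (pre.length - kn)).length = kn := by
        rw [List.length_drop]; omega
      obtain ⟨c, ct, hcct⟩ : ∃ c ct, pre.drop (pre.length - kn) = c :: ct := by
        cases h : pre.drop (pre.length - kn) with
        | nil => rw [h] at hlen1; simp at hlen1; omega
        | cons c ct => exact ⟨c, ct, rfl⟩
      have hctlen : ct.length + 1 = kn := by rw [hcct] at hlen1; simpa using hlen1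
      have hdropA : (pre ++ [e]).drop (pre.length + 1 - kn) = ct ++ [e] := by
        rw [List.drop_append_of_le_length (by omega)]
        have h1 : pre.drop (pre.length + 1 - kn) = ct := by
          rw [show pre.length + 1 - kn = pre.length - kn + 1 from by omega,
              ← List.tail_drop, hcct]
          rfl
        rw [h1]
      have hstep : stepA (kn : Int) (pre.drop (pre.length - kn), (pre.drop (pre.length - kn)).sum, r, f) e
          = if r > ct.sum + e ∨ r = -1 then (ct ++ [e], ct.sum + e, ct.sum + e, true)
            else (ct ++ [e], ct.sum + e, r, f) := by
        have hlc : ((pre.drop (pre.length - kn)).length : Int) = (kn : Int) := by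
          rw [hlen1]
        simp only [stepA, if_neg he, if_pos hlc]
        rw [hcct]
        simp only [List.tail_cons, List.headD_cons, List.sum_cons]
        have hlc2 : (((ct ++ [e]).length : Int)) = (kn : Int) := by
          simp only [List.length_append, List.length_cons, List.length_nil]
          push_cast
          omega
        rw [if_pos hlc2]
        have harith : c + ct.sum - c + e = ct.sum + e := by ring
        rw [harith]
      rw [hstep]
      -- window-list decomposition
      have hidx : pre.length + 1 - kn < (wlist seg kn).length := by rw [hwlen]; omega
      have hw : wsum seg kn (pre.length + 1 - kn) = ct.sum + e := by
        unfold wsum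
        rw [hsp']
        rw [List.drop_append_of_le_length (by
          simp only [List.length_append, List.length_cons, List.length_nil]; omega)]
        have hlen3 : ((pre ++ [e]).drop (pre.length + 1 - kn)).length = kn := by
          simp only [List.length_drop, List.length_append, List.length_cons, List.length_nil]
          omega
        rw [List.take_left' hlen3, hdropA]
        simp
      have hdropw : (wlist seg kn).drop (pre.length + 1 - kn)
          = (ct.sum + e) :: (wlist seg kn).drop (pre.length + 2 - kn) := by
        rw [List.drop_eq_getElem_cons hidx]
        congr 1
        · rw [← hw]; simp [wlist, wsum]
        · congr 1; omega
      rw [hdropw, List.foldl_cons]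
      have hupd : pvUpd (r, f) (ct.sum + e)
          = if r > ct.sum + e ∨ r = -1 then (ct.sum + e, true) else (r, f) := by
        simp [pvUpd]
      have hihgen : ∀ (r2 : Int) (f2 : Bool),
          (t.foldl (stepA (kn : Int)) (ct ++ [e], ct.sum + e, r2, f2)).2.2
            = List.foldl pvUpd (r2, f2) ((wlist seg kn).drop (pre.length + 2 - kn)) := by
        intro r2 f2
        have h := ih (pre ++ [e]) hsp' r2 f2
        have hd : (pre ++ [e]).drop ((pre ++ [e]).length - kn) = ct ++ [e] := by
          rw [show (pre ++ [e]).length - kn = pre.length + 1 - kn from by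
            simp only [List.length_append, List.length_cons, List.length_nil], hdropA]
        rw [hd] at h
        rw [show ((ct ++ [e]).sum) = ct.sum + e from by simp] at h
        rw [show (pre ++ [e]).length + 1 - kn = pre.length + 2 - kn from by
          simp only [List.length_append, List.length_cons, List.length_nil]] at h
        exact h
      by_cases hcond : r > ct.sum + e ∨ r = -1
      · rw [if_pos hcond] at hstep ⊢
        rw [if_pos hcond] at hupd
        rw [hupd, hihgen]
      · rw [if_neg hcond] at hupd
        rw [if_neg hcond]
        rw [hupd, hihgen]
    · -- the window is not yet full: A just appends
      have hdz : pre.length - kn = 0 := by omega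
      have hdrop0 : pre.drop (pre.length - kn) = pre := by rw [hdz, List.drop_zero]
      have hlc : ¬ (((pre.drop (pre.length - kn)).length : Int) = (kn : Int)) := by
        rw [hdrop0]
        intro h
        have : pre.length = kn := by exact_mod_cast h
        omega
      have hihgen : ∀ (r2 : Int) (f2 : Bool),
          (t.foldl (stepA (kn : Int)) (pre ++ [e], pre.sum + e, r2, f2)).2.2
            = List.foldl pvUpd (r2, f2) ((wlist seg kn).drop (pre.length + 2 - kn)) := by
        intro r2 f2
        have h := ih (pre ++ [e]) hsp' r2 f2
        have hd : (pre ++ [e]).drop ((pre ++ [e]).length - kn) = pre ++ [e] := by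
          rw [show (pre ++ [e]).length - kn = 0 from by
            simp only [List.length_append, List.length_cons, List.length_nil]; omega,
            List.drop_zero]
        rw [hd] at h
        rw [show ((pre ++ [e]).sum) = pre.sum + e from by simp] at h
        rw [show (pre ++ [e]).length + 1 - kn = pre.length + 2 - kn from by
          simp only [List.length_append, List.length_cons, List.length_nil]] at h
        exact h
      by_cases heq : pre.length + 1 = kn
      · -- this element completes the first window of the segment
        have hlc2 : (((pre.drop (pre.length - kn) ++ [e]).length : Int)) = (kn : Int) := by
          rw [hdrop0]
          simp only [List.length_append, List.length_cons, List.length_nil]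
          push_cast
          omega
        have hstep : stepA (kn : Int) (pre.drop (pre.length - kn), (pre.drop (pre.length - kn)).sum, r, f) e
            = if r > pre.sum + e ∨ r = -1 then (pre ++ [e], pre.sum + e, pre.sum + e, true)
              else (pre ++ [e], pre.sum + e, r, f) := by
          simp only [stepA, if_neg he, if_neg hlc]
          rw [if_pos hlc2, hdrop0]
        rw [hstep]
        have hidx : pre.length + 1 - kn < (wlist seg kn).length := by rw [hwlen]; omega
        have hz : pre.length + 1 - kn = 0 := by omega
        have hw : wsum seg kn 0 = pre.sum + e := by
          unfold wsum
          rw [hsp', List.drop_zero]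
          have hlen3 : (pre ++ [e]).length = kn := by simp; omega
          rw [List.take_left' hlen3]
          simp
        have hdropw : (wlist seg kn).drop (pre.length + 1 - kn)
            = (pre.sum + e) :: (wlist seg kn).drop (pre.length + 2 - kn) := by
          rw [hz] at hidx ⊢
          rw [List.drop_eq_getElem_cons hidx]
          congr 1
          · rw [← hw]; simp [wlist, wsum]
          · congr 1; omega
        rw [hdropw, List.foldl_cons]
        have hupd : pvUpd (r, f) (pre.sum + e)
            = if r > pre.sum + e ∨ r = -1 then (pre.sum + e, true) else (r, f) := by
          simp [pvUpd]
        by_cases hcond : r > pre.sum + e ∨ r = -1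
        · rw [if_pos hcond] at hstep ⊢
          rw [if_pos hcond] at hupd
          rw [hupd, hihgen]
        · rw [if_neg hcond] at hupd
          rw [if_neg hcond]
          rw [hupd, hihgen]
      · -- window still short of kn: no update fires
        have hlc2 : ¬ ((((pre.drop (pre.length - kn) ++ [e]).length : Int)) = (kn : Int)) := by
          rw [hdrop0]
          simp only [List.length_append, List.length_cons, List.length_nil]
          push_cast
          omega
        have hstep : stepA (kn : Int) (pre.drop (pre.length - kn), (pre.drop (pre.length - kn)).sum, r, f) e
            = (pre ++ [e], pre.sum + e, r, f) := by
          simp only [stepA, if_neg he, if_neg hlc]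
          rw [if_neg hlc2, hdrop0]
        rw [hstep]
        rw [show pre.length + 1 - kn = pre.length + 2 - kn from by omega] at *
        exact hihgen r f

-- the prefix-sum loop, generalized over its accumulator
lemma pvPrefix_aux : ∀ (seg pref : List Int) (x : Int), pref.getLast? = some x →
    seg.foldl (fun pref e => pref ++ [pref.getLastD 0 + e]) pref
      = pref ++ (List.range seg.length).map (fun i => x + ((seg.take (i + 1)).sum)) := by
  intro seg
  induction seg with
  | nil => intro pref x _; simp
  | cons e seg ih =>
    intro pref x hx
    simp only [List.foldl_cons]
    have hlast : pref.getLastD 0 = x := by rw [List.getLastD_eq_getLast?, hx]; rfl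
    rw [hlast, ih (pref ++ [x + e]) (x + e) List.getLast?_concat]
    rw [List.length_cons, List.range_succ_eq_map, List.map_cons, List.map_map]
    rw [List.append_assoc]
    congr 1
    rw [List.singleton_append]
    congr 1
    · simp
    · congr 1
      funext i
      simp only [Function.comp_apply, Nat.succ_eq_add_one, List.take_succ_cons, List.sum_cons]
      ring

-- the prefix-sum array is the list of sums of initial segments
lemma pvPrefix_eq (seg : List Int) :
    pvPrefix seg = (List.range (seg.length + 1)).map (fun i => (seg.take i).sum) := by
  unfold pvPrefix
  rw [pvPrefix_aux seg [0] 0 rfl]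
  rw [List.range_succ_eq_map, List.map_cons, List.map_map, List.singleton_append]
  refine congrArg₂ (· :: ·) (by simp) ?_
  apply List.map_congr_left
  intro i _
  simp [Nat.succ_eq_add_one]

-- B's per-segment loop is the pvUpd fold over all window sums
lemma segB_eq (k : Int) (hk : 1 ≤ k) (seg : List Int) (st : Int × Bool) :
    pvSegFold k st seg = List.foldl pvUpd st (wlist seg k.toNat) := by
  have hkn1 : 1 ≤ k.toNat := by omega
  unfold pvSegFold wlist
  rw [PySem.List.pyRange_one, List.foldl_map, List.foldl_map]
  have hm : (((seg.length : Int) - k + 1) - 0).toNat = seg.length + 1 - k.toNat := by omega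
  rw [hm]
  apply PySem.List.foldl_congr_mem
  intro acc j hj
  have hj' : j < seg.length + 1 - k.toNat := List.mem_range.mp hj
  have h1 : (0 : Int) + (j : Int) + k = ((j + k.toNat : Nat) : Int) := by push_cast; omega
  have h2 : (0 : Int) + (j : Int) = ((j : Nat) : Int) := by ring
  rw [h1, h2, PySem.List.pyGetD_natCast, PySem.List.pyGetD_natCast, pvPrefix_eq]
  rw [PySem.List.getD_map_range _ _ _ _ (by omega), PySem.List.getD_map_range _ _ _ _ (by omega)]
  unfold wsum
  congr 1
  rw [List.take_add, List.sum_append]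
  ring

-- per segment, A's processing equals B's
lemma proc_eq (k : Int) (hk : 1 ≤ k) (seg : List Int) (hne : ∀ e ∈ seg, e ≠ -1)
    (acc : Int × Bool) : procA k acc seg = pvSegFold k acc seg := by
  have hkn : ((k.toNat : Nat) : Int) = k := Int.toNat_of_nonneg (by omega)
  have hkn1 : 1 ≤ k.toNat := by omega
  have h := segA_eq k.toNat hkn1 seg hne seg [] (by simp) acc.1 acc.2
  rw [hkn] at h
  simp only [List.length_nil, List.drop_nil, List.sum_nil] at h
  rw [show 0 + 1 - k.toNat = 0 from by omega, List.drop_zero] at h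
  rw [segB_eq k hk seg acc]
  unfold procA
  rw [h]

-- per row
lemma row_eq (k : Int) (hk : 1 ≤ k) (acc : Int × Bool) (row : List Int) :
    rowA k acc row = pvRowB k acc row := by
  have h2 := segSplit k row [] acc.1 acc.2
  simp only [List.foldl_nil] at h2
  have h1 : rowA k acc row = (row.foldl (stepA k) ([], 0, acc.1, acc.2)).2.2 := rfl
  rw [h1, h2]
  show List.foldl (procA k) (acc.1, acc.2) (pvSegments row)
      = List.foldl (pvSegFold k) acc (pvSegments row)
  exact PySem.List.foldl_congr_mem _ _ _ _
    (fun b seg hseg => proc_eq k hk seg (segments_no_neg row seg hseg) b)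

-- k < 1 side: helper lemmas showing A's (result, found) never changes
lemma stepA_all_neg1 (k : Int) :
    ∀ (t : List Int), (∀ e ∈ t, e = -1) →
    ∀ (cl : List Int) (s r : Int) (f : Bool),
      (t.foldl (stepA k) (cl, s, r, f)).2.2 = (r, f) := by
  intro t
  induction t with
  | nil => intro _ cl s r f; rfl
  | cons e t ih =>
    intro h cl s r f
    have he : e = -1 := h e (by simp)
    simp only [List.foldl_cons, stepA, he]
    exact ih (fun x hx => h x (by simp [hx])) _ _ _ _

lemma stepA_neg (k : Int) (hk : k < 0) :
    ∀ (t : List Int) (cl : List Int) (s r : Int) (f : Bool),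
      (t.foldl (stepA k) (cl, s, r, f)).2.2 = (r, f) := by
  intro t
  induction t with
  | nil => intro cl s r f; rfl
  | cons e t ih =>
    intro cl s r f
    by_cases he : e = -1
    · simp only [List.foldl_cons, stepA, he]; exact ih _ _ _ _
    · have h1 : ¬ ((cl.length : Int) = k) := by omega
      have h2 : ¬ (((cl ++ [e]).length : Int) = k) := by
        simp only [List.length_append, List.length_cons, List.length_nil]; push_cast; omega
      simp only [List.foldl_cons, stepA, he, if_neg h1, if_neg h2]
      exact ih _ _ _ _

lemma rowA_id (k : Int) :
    ∀ (rows : List (List Int)),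
      (∀ row ∈ rows, ∀ (cl : List Int) (s r : Int) (f : Bool),
          (row.foldl (stepA k) (cl, s, r, f)).2.2 = (r, f)) →
      ∀ (acc : Int × Bool), rows.foldl (rowA k) acc = acc := by
  intro rows
  induction rows with
  | nil => intro _ acc; rfl
  | cons row rows ih =>
    intro h acc
    have hr : rowA k acc row = acc := by
      have := h row (by simp) [] 0 acc.1 acc.2
      simp only [rowA]
      rw [show ((row.foldl (stepA k) ([], 0, acc.1, acc.2)).2.2.1,
               (row.foldl (stepA k) ([], 0, acc.1, acc.2)).2.2.2)
            = (row.foldl (stepA k) ([], 0, acc.1, acc.2)).2.2 from rfl, this]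
    simp only [List.foldl_cons, hr]
    exact ih (fun r hr => h r (by simp [hr])) acc

-- ===== VERDICT (by name: the statement is the Claim_ definition above) =====
theorem getMinPrice_spec : Claim_equal_getMinPrice := by
  intro k sp _ hpre
  unfold Spec_getMinPrice getMinPrice getMinPrice_alt
  by_cases hk1 : k < 1
  · rw [if_pos hk1]
    have hid : sp.foldl (rowA k) (-1, false) = (-1, false) := by
      apply rowA_id
      intro row hrow cl s r f
      by_cases hk0 : k = 0
      · exact stepA_all_neg1 k row (fun e he => hpre hk0 row hrow e he) cl s r f
      · exact stepA_neg k (by omega) row cl s r f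
    simp [hid]
  · rw [if_neg hk1]
    have hfold : sp.foldl (rowA k) (-1, false) = sp.foldl (pvRowB k) (-1, false) := by
      exact PySem.List.foldl_congr_mem sp _ _ _ (fun acc row _ => row_eq k (by omega) acc row)
    rw [hfold]
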